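-- pv_equiv track=rewrite | github.com/torsteinelv/speech-dataset-builder | src/main.py | batch_candidates
-- ===== SOURCE A (Python) =====
-- from typing import Any, Dict, List, Optional, Tuple
--
-- def batch_candidates(primary: int) -> List[int]:
--     out = []
--     b = max(1, int(primary))
--     while True:
--         if b not in out:
--             out.append(b)
--         if b == 1:
--             break
--         b = max(1, b // 2)
--     return out
-- ===== SOURCE B (Python) =====
-- def batch_candidates(primary: int) -> list:
--     n = max(1, int(primary))
--     return [n >> i for i in range(n.bit_length())]
-- ===== Notes on version B (the rewrite author's own statement) =====
-- stated objective: simpler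
-- what changed: Replaces the mutate-test-break while loop (with its membership check) by a closed-form length: the sequence is exactly [n >> i for i in range(n.bit_length())], since halving equals right-shifting and the values are strictly decreasing so duplicates never occur.
import Mathlib
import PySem

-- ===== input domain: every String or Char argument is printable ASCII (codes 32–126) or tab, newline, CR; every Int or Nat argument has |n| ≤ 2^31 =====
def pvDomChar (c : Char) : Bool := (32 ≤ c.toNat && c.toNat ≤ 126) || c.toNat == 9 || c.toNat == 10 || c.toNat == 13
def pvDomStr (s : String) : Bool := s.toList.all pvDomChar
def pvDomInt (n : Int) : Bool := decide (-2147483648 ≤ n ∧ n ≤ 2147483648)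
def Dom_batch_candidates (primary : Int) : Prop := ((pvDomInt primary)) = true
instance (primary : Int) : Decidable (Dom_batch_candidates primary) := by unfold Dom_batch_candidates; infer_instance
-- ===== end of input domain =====

-- B replaces A's mutate-test-break while loop by a closed-form length (bit_length) and shift-indexed map; return values proved equal for all inputs.

-- ===== PORT A =====
-- the 'while True' loop of A: append b if absent, stop at 1, else b = max(1, b // 2)
def batchLoopA (out : List Int) (b : Int) : List Int :=
  let out' := if out.contains b then out else out ++ [b]
  if b = 1 then out' else batchLoopA out' (max 1 (PySem.Int.floordiv b 2))
termination_by (if b ≤ 0 then 2 else b.toNat)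
decreasing_by
  have h2 : PySem.Int.floordiv b 2 = b / 2 := PySem.Int.floordiv_eq_ediv_of_pos (by omega)
  rename_i hb1
  by_cases h : b ≤ 0
  · simp only [h2]
    have : max 1 (b / 2) = 1 := by omega
    simp [this, h]
  · have hb2 : 2 ≤ b := by omega
    have hq1 : 1 ≤ b / 2 := by omega
    have hqlt : b / 2 < b := by omega
    have : max 1 (b / 2) = b / 2 := by omega
    simp only [h2, this]
    have : ¬ (b / 2 ≤ 0) := by omega
    simp [this, show ¬ b ≤ 0 by omega]
    omega

def batch_candidates (primary : Int) : List Int :=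
  batchLoopA [] (max 1 primary)

-- ===== PORT B =====
def batch_candidates_alt (primary : Int) : List Int :=
  let n : Nat := (max 1 primary).toNat
  (List.range (Nat.log2 n + 1)).map (fun i => ((n >>> i : Nat) : Int))

-- ===== PRECONDITION & SPEC =====
def Spec_batch_candidates (primary : Int) (out : List Int) : Prop := out = batch_candidates_alt primary
instance (primary : Int) (out : List Int) : Decidable (Spec_batch_candidates primary out) := by unfold Spec_batch_candidates; infer_instance

-- ===== CLAIM (what is proved, stated in full; the proofs are below) =====
def Claim_equal_batch_candidates : Prop := ∀ (primary : Int), Dom_batch_candidates primary → Spec_batch_candidates primary (batch_candidates primary)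

-- ===== LEMMAS AND PROOFS =====

theorem shiftRight_succ_div (n i : Nat) : n >>> (i + 1) = (n / 2) >>> i := by
  simp [Nat.shiftRight_eq_div_pow, Nat.div_div_eq_div_mul, pow_succ, Nat.mul_comm]

theorem batchLoopA_eq (n : Nat) (hn : 1 ≤ n) (out : List Int)
    (hout : ∀ x ∈ out, (n : Int) < x) :
    batchLoopA out (n : Int) =
      out ++ (List.range (Nat.log2 n + 1)).map (fun i => ((n >>> i : Nat) : Int)) := by
  induction n using Nat.strong_induction_on generalizing out with
  | _ n ih =>
    have hnotmem : out.contains (n : Int) = false := by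
      simp only [List.contains_eq_any_beq, List.any_eq_false]
      intro x hx
      have := hout x hx
      simp only [beq_iff_eq]
      omega
    by_cases h1 : n = 1
    · subst h1
      have hmem : (1 : Int) ∉ out := by
        intro hx; have := hout _ hx; simp at this
      rw [batchLoopA]
      simp only [hnotmem, Bool.false_eq_true, if_false]
      rw [if_pos (by norm_num)]
      simp [Nat.log2]
      decide
    · have h2 : 2 ≤ n := by omega
      have hstep : batchLoopA out (n : Int) = batchLoopA (out ++ [(n : Int)]) (max 1 (PySem.Int.floordiv (n : Int) 2)) := by
        rw [batchLoopA]
        simp only [hnotmem, Bool.false_eq_true, if_false]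
        rw [if_neg (by exact_mod_cast h1)]
      have hfd : PySem.Int.floordiv (n : Int) 2 = ((n / 2 : Nat) : Int) := by
        exact_mod_cast PySem.Int.floordiv_natCast n 2
      have hmax : max 1 ((n / 2 : Nat) : Int) = ((n / 2 : Nat) : Int) := by
        have : 1 ≤ n / 2 := Nat.one_le_div_iff (by omega) |>.mpr (by omega)
        omega
      rw [hstep, hfd, hmax]
      rw [ih (n / 2) (by omega) (Nat.one_le_div_iff (by omega) |>.mpr (by omega))
          (out ++ [(n : Int)])
          (by intro x hx
              rcases List.mem_append.mp hx with hx | hx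
              · have := hout x hx
                omega
              · simp at hx
                subst hx
                omega)]
      have hlog : Nat.log2 n = Nat.log2 (n / 2) + 1 := by
        have hp : 0 < Nat.log 2 n := Nat.log_pos one_lt_two h2
        have hd := Nat.log_div_base 2 n
        simp only [Nat.log2_eq_log_two]
        omega
      rw [hlog, List.append_assoc]
      congr 1
      conv_rhs => rw [List.range_succ_eq_map]
      simp only [List.map_cons, List.map_map, Nat.shiftRight_zero,
        List.cons_append, List.nil_append]
      congr 1
      apply List.map_congr_left
      intro i _
      simp [Function.comp, shiftRight_succ_div]

-- ===== VERDICT (by name: the statement is the Claim_ definition above) =====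
theorem batch_candidates_spec : Claim_equal_batch_candidates := by
  intro primary _
  unfold Spec_batch_candidates batch_candidates batch_candidates_alt
  have h1 : (1 : Int) ≤ max 1 primary := le_max_left _ _
  have hcast : ((max 1 primary).toNat : Int) = max 1 primary := Int.toNat_of_nonneg (by omega)
  rw [← hcast]
  exact batchLoopA_eq _ (by omega) [] (by simp)
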